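-- pv_equiv track=rewrite | github.com/nekros1xx/ghascan | src/gha_vuln_scanner/scanner.py | _is_boolean_result
-- ===== SOURCE A (Python) =====
-- def _is_boolean_result(expr_str):
--     inner = expr_str.strip()
--     if inner.startswith('${{') and inner.endswith('}}'):
--         inner = inner[3:-2].strip()
--     if not inner:
--         return False
--     bare = inner
--     while bare.startswith('(') and bare.endswith(')'):
--         bare = bare[1:-1].strip()
--     if bare.startswith('!'):
--         return True
--     depth = 0
--     i = 0
--     while i < len(bare):
--         ch = bare[i]
--         if ch == '(':
--             depth += 1
--         elif ch == ')':
--             depth -= 1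
--         elif ch in ("'", '"'):
--             q = ch; i += 1
--             while i < len(bare) and bare[i] != q:
--                 i += 1
--         elif depth == 0:
--             rest = bare[i:]
--             if rest.startswith('==') or rest.startswith('!='):
--                 return True
--             if rest.startswith('<=') or rest.startswith('>='):
--                 return True
--             if ch in '<>' and not rest.startswith('<<'):
--                 return True
--         i += 1
--     bool_funcs = ('contains(', 'startsWith(', 'endsWith(', 'always(',
--                   'failure(', 'success(', 'cancelled(', 'hashFiles(')
--     for fn in bool_funcs:
--         if bare.startswith(fn):
--             return True
--     return False
-- ===== SOURCE B (Python) =====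
-- def _is_boolean_result(expr_str):
--     inner = expr_str.strip()
--     if inner.startswith('${{') and inner.endswith('}}'):
--         inner = inner[3:-2].strip()
--     if not inner:
--         return False
--     bare = inner
--     while bare.startswith('(') and bare.endswith(')'):
--         bare = bare[1:-1].strip()
--     if bare.startswith('!'):
--         return True
--     # Phase 1: mask out everything inside parentheses or quotes, one space per
--     # skipped region/char so operator adjacency at depth 0 is preserved.
--     mask = []
--     depth = 0
--     i = 0
--     n = len(bare)
--     while i < n:
--         ch = bare[i]
--         if ch == '(':
--             depth += 1
--             mask.append(' ')
--         elif ch == ')':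
--             depth -= 1
--             mask.append(' ')
--         elif ch in ("'", '"'):
--             i += 1
--             while i < n and bare[i] != ch:
--                 i += 1
--             mask.append(' ')
--         elif depth == 0:
--             mask.append(ch)
--         else:
--             mask.append(' ')
--         i += 1
--     s = ''.join(mask)
--     # Phase 2: search the skeleton (any '<'/'>' suffices: a '<<' run ends in a
--     # '<' that the original also accepts).
--     if '==' in s or '!=' in s or '<' in s or '>' in s:
--         return True
--     return bare.startswith(('contains(', 'startsWith(', 'endsWith(', 'always(',
--                             'failure(', 'success(', 'cancelled(', 'hashFiles('))
-- ===== Notes on version B (the rewrite author's own statement) =====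
-- stated objective: faster
-- what changed: A's single scanning loop, which slices rest = bare[i:] and runs four early-return operator checks at every depth-0 position, is replaced by a two-phase pipeline: one linear pass builds a depth-0/out-of-quote skeleton (skipped regions masked by a space to preserve adjacency), then plain substring searches for the equality/inequality and angle-bracket operators decide the result; the redundant less-equal/greater-equal/shift special cases disappear because any depth-0 angle bracket already answers True.
import Mathlib
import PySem

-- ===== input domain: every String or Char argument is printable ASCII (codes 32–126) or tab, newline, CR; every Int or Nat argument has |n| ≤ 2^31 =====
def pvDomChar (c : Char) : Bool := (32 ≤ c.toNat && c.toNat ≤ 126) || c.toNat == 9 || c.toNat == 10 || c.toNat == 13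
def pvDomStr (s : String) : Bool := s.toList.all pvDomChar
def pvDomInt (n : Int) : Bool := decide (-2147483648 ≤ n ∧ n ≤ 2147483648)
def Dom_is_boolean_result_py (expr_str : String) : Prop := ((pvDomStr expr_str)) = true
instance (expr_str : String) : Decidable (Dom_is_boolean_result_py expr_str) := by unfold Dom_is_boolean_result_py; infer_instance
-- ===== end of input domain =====

-- B replaces A's early-return operator scan (which slices rest = bare[i:] per position) by a mask-then-substring-search pipeline; a timing run measured B faster.

-- ===== PORT A =====
-- shared helpers: both Pythons contain the identical normalization lines
-- (strip, '${{ … }}' removal, outer-paren peeling), the identical inner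
-- quote-skipping while loop, and the same bool_funcs prefix test.

-- inner 'while i < n and bare[i] != q: i += 1' followed by the outer 'i += 1':
-- returns the rest of the list after the closing quote (or [] if unterminated).
def pvSkipQuote (q : Char) : List Char → List Char
  | [] => []
  | c :: r => if c = q then r else pvSkipQuote q r

theorem pvSkipQuote_length_le (q : Char) (l : List Char) : (pvSkipQuote q l).length ≤ l.length := by
  induction l with
  | nil => simp [pvSkipQuote]
  | cons c r ih =>
    by_cases h : c = q
    · simp [pvSkipQuote, h]
    · simp [pvSkipQuote, h]; omega

theorem pvStrip_length_le (l : List Char) : (PySem.Chars.strip l).length ≤ l.length := by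
  unfold PySem.Chars.strip PySem.Chars.rstrip PySem.Chars.lstrip
  simp only [List.length_reverse]
  exact le_trans (List.length_dropWhile_le _ _)
    (by simpa using List.length_dropWhile_le PySem.Chars.isspace l)

-- "while bare.startswith('(') and bare.endswith(')'): bare = bare[1:-1].strip()"
def pvPeel (bare : List Char) : List Char :=
  if PySem.Chars.startswith bare ['('] && PySem.Chars.endswith bare [')'] then
    pvPeel (PySem.Chars.strip (PySem.List.slice bare (some 1) (some (-1))))
  else bare
termination_by bare.length
decreasing_by
  rename_i h
  have hne : bare ≠ [] := by
    rcases Bool.and_eq_true .. |>.mp h with ⟨h1, _⟩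
    intro hnil; subst hnil; simp [PySem.Chars.startswith, List.isPrefixOf] at h1
  have hlen : 1 ≤ bare.length := by
    cases bare with
    | nil => exact absurd rfl hne
    | cons a t => simp
  have hs : (PySem.List.slice bare (some 1) (some (-1))).length < bare.length := by
    rw [PySem.List.length_slice]
    simp
    omega
  exact lt_of_le_of_lt (pvStrip_length_le _) hs

-- 'inner = expr_str.strip()' and the '${{ … }}' removal (shared lines of A and B)
def pvInner (expr_str : String) : List Char :=
  let inner := PySem.Chars.strip expr_str.toList
  if PySem.Chars.startswith inner ['$', '{', '{'] && PySem.Chars.endswith inner ['}', '}'] then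
    PySem.Chars.strip (PySem.List.slice inner (some 3) (some (-2)))
  else inner

-- 'for fn in bool_funcs: if bare.startswith(fn): return True' / B's 'bare.startswith(tuple)'
def pvBoolFuncs (bare : List Char) : Bool :=
  ["contains(", "startsWith(", "endsWith(", "always(", "failure(", "success(",
   "cancelled(", "hashFiles("].any (fun fn => PySem.Chars.startswith bare fn.toList)

-- A's scanning while loop: early return True on a depth-0, out-of-quote comparison operator
def pvLoopA : List Char → Int → Bool
  | [], _ => false
  | ch :: t, depth =>
    if ch = '(' then pvLoopA t (depth + 1)
    else if ch = ')' then pvLoopA t (depth - 1)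
    else if ch = '\'' || ch = '"' then pvLoopA (pvSkipQuote ch t) depth
    else if depth = 0 then
      if PySem.Chars.startswith (ch :: t) ['=', '='] || PySem.Chars.startswith (ch :: t) ['!', '='] then true
      else if PySem.Chars.startswith (ch :: t) ['<', '='] || PySem.Chars.startswith (ch :: t) ['>', '='] then true
      else if (ch = '<' || ch = '>') && !(PySem.Chars.startswith (ch :: t) ['<', '<']) then true
      else pvLoopA t depth
    else pvLoopA t depth
termination_by l _ => l.length
decreasing_by
  · simp
  · simp
  · exact Nat.lt_succ_of_le (pvSkipQuote_length_le _ _)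
  · simp
  · simp

def is_boolean_result_py (expr_str : String) : Bool :=
  let inner := pvInner expr_str
  if inner = [] then false
  else
    let bare := pvPeel inner
    if PySem.Chars.startswith bare ['!'] then true
    else if pvLoopA bare 0 then true
    else pvBoolFuncs bare

-- ===== PORT B =====
-- B's phase 1: build the skeleton, one output char per loop iteration
-- (a space for every masked position or skipped quoted region)
def pvMaskB : List Char → Int → List Char
  | [], _ => []
  | ch :: t, depth =>
    if ch = '(' then ' ' :: pvMaskB t (depth + 1)
    else if ch = ')' then ' ' :: pvMaskB t (depth - 1)
    else if ch = '\'' || ch = '"' then ' ' :: pvMaskB (pvSkipQuote ch t) depth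
    else if depth = 0 then ch :: pvMaskB t depth
    else ' ' :: pvMaskB t depth
termination_by l _ => l.length
decreasing_by
  · simp
  · simp
  · exact Nat.lt_succ_of_le (pvSkipQuote_length_le _ _)
  · simp
  · simp

def is_boolean_result_py_alt (expr_str : String) : Bool :=
  let inner := pvInner expr_str
  if inner = [] then false
  else
    let bare := pvPeel inner
    if PySem.Chars.startswith bare ['!'] then true
    else
      let s := pvMaskB bare 0
      -- B's phase 2: plain substring searches on the skeleton
      if PySem.Chars.isIn ['=', '='] s || PySem.Chars.isIn ['!', '='] s ||
         PySem.Chars.isIn ['<'] s || PySem.Chars.isIn ['>'] s then true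
      else pvBoolFuncs bare

-- ===== PRECONDITION & SPEC =====
def Spec_is_boolean_result_py (expr_str : String) (out : Bool) : Prop := out = is_boolean_result_py_alt expr_str
instance (expr_str : String) (out : Bool) : Decidable (Spec_is_boolean_result_py expr_str out) := by unfold Spec_is_boolean_result_py; infer_instance

-- ===== CLAIM (what is proved, stated in full; the proofs are below) =====
def Claim_equal_is_boolean_result_py : Prop := ∀ (expr_str : String), Dom_is_boolean_result_py expr_str → Spec_is_boolean_result_py expr_str (is_boolean_result_py expr_str)

-- ===== LEMMAS AND PROOFS =====

-- the property B's substring searches decide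
def pvP (s : List Char) : Prop := ['=', '='] <:+: s ∨ ['!', '='] <:+: s ∨ '<' ∈ s ∨ '>' ∈ s

theorem pvCheck_iff (s : List Char) :
    (PySem.Chars.isIn ['=', '='] s || PySem.Chars.isIn ['!', '='] s ||
     PySem.Chars.isIn ['<'] s || PySem.Chars.isIn ['>'] s) = true ↔ pvP s := by
  simp [PySem.Chars.isIn_iff_infix, List.singleton_infix_iff, pvP, or_assoc]

theorem pvPrefix_singleton_iff (b : Char) (m : List Char) : [b] <+: m ↔ m.head? = some b := by
  cases m with
  | nil => simp
  | cons x r => simp [List.cons_prefix_cons, eq_comm]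

theorem pvSW2 (a b ch : Char) (t : List Char) :
    PySem.Chars.startswith (ch :: t) [a, b] = true ↔ (a = ch ∧ t.head? = some b) := by
  rw [PySem.Chars.startswith_iff, List.cons_prefix_cons, pvPrefix_singleton_iff]

theorem pvP_cons (c : Char) (m : List Char) :
    pvP (c :: m) ↔ ((c = '=' ∧ m.head? = some '=') ∨ (c = '!' ∧ m.head? = some '=') ∨ c = '<' ∨ c = '>') ∨ pvP m := by
  simp only [pvP, List.infix_cons_iff, List.cons_prefix_cons, pvPrefix_singleton_iff, List.mem_cons]
  constructor
  · rintro (h | h | h | h) <;> tauto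
  · rintro (h | h) <;> tauto

theorem pvMask_head_eq (t : List Char) :
    ((pvMaskB t 0).head? = some '=') ↔ (t.head? = some '=') := by
  cases t with
  | nil => simp [pvMaskB]
  | cons y t' =>
    rw [pvMaskB]
    split_ifs with h1 h2 h3 h4
    · subst h1; simp
    · subst h2; simp
    · rcases Bool.or_eq_true .. |>.mp h3 with h | h <;>
        rw [decide_eq_true_iff.mp h] <;> simp
    · simp
    · exact absurd rfl h4

theorem pvKey : ∀ (n : Nat) (l : List Char) (d : Int), l.length ≤ n →
    (pvLoopA l d = true ↔ pvP (pvMaskB l d)) := by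
  intro n
  induction n with
  | zero =>
    intro l d hl
    have : l = [] := List.eq_nil_of_length_eq_zero (Nat.le_zero.mp hl)
    subst this
    simp [pvLoopA, pvMaskB, pvP]
  | succ n ih =>
    intro l d hl
    match l with
    | [] => simp [pvLoopA, pvMaskB, pvP]
    | ch :: t =>
      have ht : t.length ≤ n := by simpa using Nat.lt_succ_iff.mp (by simpa using hl)
      have htq : (pvSkipQuote ch t).length ≤ n := le_trans (pvSkipQuote_length_le _ _) ht
      rw [pvLoopA, pvMaskB]
      split_ifs with h1 h2 h3 h4 h5 h6 h7
      · -- '('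
        rw [pvP_cons, ih t (d + 1) ht]; simp
      · -- ')'
        rw [pvP_cons, ih t (d - 1) ht]; simp
      · -- quote
        rw [pvP_cons, ih (pvSkipQuote ch t) d htq]
        rcases Bool.or_eq_true .. |>.mp h3 with h | h <;>
          simp [decide_eq_true_iff.mp h]
      · -- depth 0, '==' or '!='
        subst h4
        rw [pvP_cons]
        refine ⟨fun _ => ?_, fun _ => rfl⟩
        rcases Bool.or_eq_true .. |>.mp h5 with h | h <;>
          rcases (pvSW2 _ _ _ _).mp h with ⟨hc, hh⟩ <;> subst hc <;>
          exact Or.inl (by simp [(pvMask_head_eq t).mpr hh])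
      · -- depth 0, '<=' or '>='
        rw [pvP_cons]
        rcases Bool.or_eq_true .. |>.mp h6 with h | h <;>
          rcases (pvSW2 _ _ _ _).mp h with ⟨hc, _⟩ <;> subst hc <;> simp
      · -- depth 0, lone '<' or '>'
        rw [pvP_cons]
        rcases Bool.and_eq_true .. |>.mp h7 with ⟨hc, _⟩
        rcases Bool.or_eq_true .. |>.mp hc with h | h <;> simp [decide_eq_true_iff.mp h]
      · -- depth 0, no comparison at this position
        rw [pvP_cons, ih t d ht]
        subst h4
        constructor
        · exact Or.inr
        · rintro (hd | hd)
          · -- the head disjunct is impossible or already implies pvP of the tail mask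
            rcases hd with ⟨hc, hh⟩ | ⟨hc, hh⟩ | hc | hc
            · exact absurd ((pvSW2 _ _ _ _).mpr ⟨hc.symm, (pvMask_head_eq t).mp hh⟩)
                (by intro hsw; exact h5 (by simp [hsw]))
            · exact absurd ((pvSW2 _ _ _ _).mpr ⟨hc.symm, (pvMask_head_eq t).mp hh⟩)
                (by intro hsw; exact h5 (by simp [hsw]))
            · -- ch = '<' : the '<<' guard must have fired, so t starts with '<'
              subst hc
              have hsw : PySem.Chars.startswith ('<' :: t) ['<', '<'] = true := by
                by_contra hn
                exact h7 (by simp [Bool.eq_false_iff.mpr hn])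
              rcases (pvSW2 _ _ _ _).mp hsw with ⟨_, hh⟩
              cases t with
              | nil => simp at hh
              | cons y t' =>
                simp at hh
                subst hh
                rw [pvMaskB]
                simp [pvP_cons]
            · -- ch = '>' : contradiction, the lone-'>' branch would have returned True
              subst hc
              exact absurd (by simp [pvSW2] : ¬ PySem.Chars.startswith ('>' :: t) ['<', '<'] = true)
                (by intro hn; exact h7 (by simp [Bool.eq_false_iff.mpr hn]))
          · exact hd
      · -- depth ≠ 0
        rw [pvP_cons, ih t d ht]; simp

-- ===== VERDICT (by name: the statement is the Claim_ definition above) =====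
theorem is_boolean_result_py_spec : Claim_equal_is_boolean_result_py := by
  intro s _
  unfold Spec_is_boolean_result_py is_boolean_result_py is_boolean_result_py_alt
  simp only []
  by_cases hi : pvInner s = []
  · simp [hi]
  · simp only [hi, if_false]
    by_cases hb : PySem.Chars.startswith (pvPeel (pvInner s)) ['!'] = true
    · simp [hb]
    · simp only [hb, Bool.false_eq_true, if_false]
      have hkey := pvKey (pvPeel (pvInner s)).length (pvPeel (pvInner s)) 0 le_rfl
      rw [← pvCheck_iff] at hkey
      have : pvLoopA (pvPeel (pvInner s)) 0 =
          (PySem.Chars.isIn ['=', '='] (pvMaskB (pvPeel (pvInner s)) 0) ||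
           PySem.Chars.isIn ['!', '='] (pvMaskB (pvPeel (pvInner s)) 0) ||
           PySem.Chars.isIn ['<'] (pvMaskB (pvPeel (pvInner s)) 0) ||
           PySem.Chars.isIn ['>'] (pvMaskB (pvPeel (pvInner s)) 0)) := by
        rcases Bool.eq_false_or_eq_true (pvLoopA (pvPeel (pvInner s)) 0) with h | h <;>
          rw [h] at hkey ⊢ <;> simp_all
      rw [this]
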